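-- pv_equiv track=rewrite | github.com/lastmyle/maestro-tuya-ir | app/core/ir_protocols/ir_send.py | sendData
-- ===== SOURCE A (Python) =====
-- from typing import List
--
-- def sendData(onemark: int, onespace: int, zeromark: int, zerospace: int,
--              data: int, nbits: int, MSBfirst: bool) -> List[int]:
--     """
--     Encode data bits into IR timings.
--     EXACT translation from IRremoteESP8266 IRsend::sendData
--     """
--     timings = []
--     if nbits == 0:  # If we are asked to send nothing, just return.
--         return timings
--     if MSBfirst:  # Send the MSB first.
--         # Send 0's until we get down to a bit size we can actually manage.
--         while nbits > 64:  # sizeof(data) * 8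
--             timings.append(zeromark)
--             timings.append(zerospace)
--             nbits -= 1
--         # Send the supplied data.
--         mask = 1 << (nbits - 1)  # 1ULL << (nbits - 1)
--         while mask:  # for (uint64_t mask = 1ULL << (nbits - 1); mask; mask >>= 1)
--             if data & mask:  # Send a 1
--                 timings.append(onemark)
--                 timings.append(onespace)
--             else:  # Send a 0
--                 timings.append(zeromark)
--                 timings.append(zerospace)
--             mask >>= 1
--     else:  # Send the Least Significant Bit (LSB) first / MSB last.
--         for bit in range(nbits):  # for (uint16_t bit = 0; bit < nbits; bit++, data >>= 1)
--             if data & 1:  # Send a 1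
--                 timings.append(onemark)
--                 timings.append(onespace)
--             else:  # Send a 0
--                 timings.append(zeromark)
--                 timings.append(zerospace)
--             data >>= 1
--     return timings
-- ===== SOURCE B (Python) =====
-- from typing import List
--
-- def sendData(onemark: int, onespace: int, zeromark: int, zerospace: int,
--              data: int, nbits: int, MSBfirst: bool) -> List[int]:
--     """Index-arithmetic rewrite: every output slot k is computed independently
--     from its position (parity of k selects mark vs space, k//2 selects which
--     data bit), instead of emitting mark/space pairs while consuming bits."""
--     if nbits <= 0:
--         return []
--     if MSBfirst:
--         cap = min(nbits, 64)       # bits above 64 are always sent as zeros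
--         lead = nbits - cap
--         bit = lambda j: (data >> (cap - 1 - (j - lead))) & 1 if j >= lead else 0
--     else:
--         bit = lambda j: (data >> j) & 1
--     return [(onemark if bit(k // 2) else zeromark) if k % 2 == 0
--             else (onespace if bit(k // 2) else zerospace)
--             for k in range(2 * nbits)]
-- ===== Notes on version B (the rewrite author's own statement) =====
-- stated objective: alternative
-- what changed: B replaces A's stateful pair-emitting loops (mask halving / data shifting while appending two timings per bit) with a single positional comprehension over output slots 0..2*nbits-1, computing each timing element independently from its index: parity picks mark vs space and k//2 picks the bit via a direct shift-and-test, with the MSB-first 64-bit cap expressed arithmetically (slots below nbits-64 are forced zero).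
import Mathlib
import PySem

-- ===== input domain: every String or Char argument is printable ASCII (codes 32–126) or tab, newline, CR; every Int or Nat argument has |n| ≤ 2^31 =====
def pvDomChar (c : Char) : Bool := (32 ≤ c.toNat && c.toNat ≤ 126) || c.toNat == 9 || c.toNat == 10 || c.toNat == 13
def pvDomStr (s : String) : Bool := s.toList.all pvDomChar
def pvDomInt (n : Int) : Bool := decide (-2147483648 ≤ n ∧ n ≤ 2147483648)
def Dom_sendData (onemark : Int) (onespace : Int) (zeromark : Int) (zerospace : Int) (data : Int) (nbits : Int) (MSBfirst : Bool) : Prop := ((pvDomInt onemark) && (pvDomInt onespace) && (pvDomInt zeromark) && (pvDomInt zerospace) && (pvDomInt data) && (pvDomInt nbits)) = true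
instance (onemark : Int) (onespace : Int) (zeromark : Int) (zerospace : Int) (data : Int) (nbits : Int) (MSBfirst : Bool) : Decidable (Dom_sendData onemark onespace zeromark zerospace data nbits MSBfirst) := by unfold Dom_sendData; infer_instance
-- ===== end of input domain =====

-- B computes each output slot independently from its index (parity → mark/space, k//2 → bit)
-- instead of A's stateful pair-emitting loops (objective: alternative, same cost).

-- ===== PORT A =====
-- `while nbits > 64: append zeromark, zerospace; nbits -= 1` (returns the timings so far and the final nbits)
def sendDataLead (zeromark zerospace : Int) (nbits : Int) (timings : List Int) : List Int × Int :=
  if nbits > 64 then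
    sendDataLead zeromark zerospace (nbits - 1) (timings ++ [zeromark, zerospace])
  else (timings, nbits)
termination_by (nbits - 64).toNat
decreasing_by omega

-- `while mask: …; mask >>= 1` — Python's mask is a nonnegative int, kept here as a Nat
def sendDataMask (onemark onespace zeromark zerospace data : Int) (mask : Nat) (timings : List Int) : List Int :=
  if mask = 0 then timings
  else
    sendDataMask onemark onespace zeromark zerospace data (mask >>> 1)
      (timings ++ if PySem.Int.band data (mask : Int) ≠ 0 then [onemark, onespace] else [zeromark, zerospace])
termination_by mask
decreasing_by
  rename_i h
  have : mask >>> 1 = mask / 2 := Nat.shiftRight_one mask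
  omega

-- `for bit in range(nbits): …; data >>= 1` — runs range(nbits).length = nbits.toNat times
def sendDataLsb (onemark onespace zeromark zerospace : Int) (data : Int) (n : Nat) (timings : List Int) : List Int :=
  match n with
  | 0 => timings
  | m + 1 =>
    sendDataLsb onemark onespace zeromark zerospace (data >>> (1 : Nat)) m
      (timings ++ if PySem.Int.band data 1 ≠ 0 then [onemark, onespace] else [zeromark, zerospace])

-- `1 << (nbits - 1)` uses (nbits-1).toNat: Python raises ValueError for nbits < 0 there (excluded by Pre_)
def sendData (onemark : Int) (onespace : Int) (zeromark : Int) (zerospace : Int) (data : Int) (nbits : Int) (MSBfirst : Bool) : List Int :=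
  if nbits = 0 then []
  else if MSBfirst then
    let p := sendDataLead zeromark zerospace nbits []
    sendDataMask onemark onespace zeromark zerospace data ((1 : Nat) <<< (p.2 - 1).toNat) p.1
  else
    sendDataLsb onemark onespace zeromark zerospace data nbits.toNat []

-- ===== PORT B =====
-- one positional pass: slot k of the output depends only on k (parity, k//2) and `data`
def sendData_alt (onemark : Int) (onespace : Int) (zeromark : Int) (zerospace : Int) (data : Int) (nbits : Int) (MSBfirst : Bool) : List Int :=
  if nbits ≤ 0 then []
  else
    let bit : Int → Int :=
      if MSBfirst then
        let cap := min nbits 64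
        let lead := nbits - cap
        fun j => if j ≥ lead then PySem.Int.band (data >>> (cap - 1 - (j - lead)).toNat) 1 else 0
      else
        fun j => PySem.Int.band (data >>> j.toNat) 1
    (PySem.List.pyRange 0 (2 * nbits) 1).map (fun k =>
      if PySem.Int.mod k 2 = 0 then
        (if bit (PySem.Int.floordiv k 2) ≠ 0 then onemark else zeromark)
      else
        (if bit (PySem.Int.floordiv k 2) ≠ 0 then onespace else zerospace))

-- ===== PRECONDITION & SPEC =====
-- A raises ValueError (negative shift count in `1 << (nbits - 1)`) when MSBfirst and nbits < 0;
-- Pre_ excludes exactly those inputs, on which A returns nothing.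
def Pre_sendData (onemark : Int) (onespace : Int) (zeromark : Int) (zerospace : Int) (data : Int) (nbits : Int) (MSBfirst : Bool) : Prop :=
  MSBfirst = true → 0 ≤ nbits
instance (onemark : Int) (onespace : Int) (zeromark : Int) (zerospace : Int) (data : Int) (nbits : Int) (MSBfirst : Bool) : Decidable (Pre_sendData onemark onespace zeromark zerospace data nbits MSBfirst) := by unfold Pre_sendData; infer_instance
def pvWitness_sendData : Int × Int × Int × Int × Int × Int × Bool := (500, 400, 300, 200, 5, 4, true)

def Spec_sendData (onemark : Int) (onespace : Int) (zeromark : Int) (zerospace : Int) (data : Int) (nbits : Int) (MSBfirst : Bool) (out : List Int) : Prop := out = sendData_alt onemark onespace zeromark zerospace data nbits MSBfirst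
instance (onemark : Int) (onespace : Int) (zeromark : Int) (zerospace : Int) (data : Int) (nbits : Int) (MSBfirst : Bool) (out : List Int) : Decidable (Spec_sendData onemark onespace zeromark zerospace data nbits MSBfirst out) := by unfold Spec_sendData; infer_instance

-- ===== CLAIM (what is proved, stated in full; the proofs are below) =====
def Claim_equal_sendData : Prop := ∀ (onemark : Int) (onespace : Int) (zeromark : Int) (zerospace : Int) (data : Int) (nbits : Int) (MSBfirst : Bool), Dom_sendData onemark onespace zeromark zerospace data nbits MSBfirst → Pre_sendData onemark onespace zeromark zerospace data nbits MSBfirst → Spec_sendData onemark onespace zeromark zerospace data nbits MSBfirst (sendData onemark onespace zeromark zerospace data nbits MSBfirst)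

-- ===== LEMMAS AND PROOFS =====

-- the timing pair A emits for bit position i of `data`
def emitBit (onemark onespace zeromark zerospace data : Int) (i : Nat) : List Int :=
  if PySem.Int.band data ((1 : Int) <<< i) ≠ 0 then [onemark, onespace] else [zeromark, zerospace]

lemma nat_bit_iff (n i : Nat) : ((n >>> i) &&& 1 = 0) ↔ (n &&& 2 ^ i = 0) := by
  have hdef : n.testBit i = ((n >>> i) &&& 1 != 0) := by
    simp [Nat.testBit, Nat.and_comm]
  rw [Nat.and_two_pow, hdef]
  by_cases hx : (n >>> i) &&& 1 = 0 <;> simp [hx]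

lemma band_negSucc_natCast (m k : Nat) :
    PySem.Int.band (Int.negSucc m) ((k : Nat) : Int) = ((k - (k &&& m) : Nat) : Int) := by
  have h0 : ¬ (0 : Int) ≤ Int.negSucc m := by
    rw [Int.negSucc_eq]; omega
  have h1 : (-(Int.negSucc m) - 1) = (m : Int) := by
    rw [Int.negSucc_eq]; ring
  simp only [PySem.Int.band, if_neg h0, if_pos (Int.natCast_nonneg k), h1]
  simp

-- testing `data & (1 << i)` is testing `(data >> i) & 1`
lemma band_shift_one (d : Int) (i : Nat) :
    (PySem.Int.band (d >>> i) 1 ≠ 0) ↔ (PySem.Int.band d ((1 : Int) <<< i) ≠ 0) := by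
  have hpow : ((1 : Int) <<< i) = ((2 ^ i : Nat) : Int) := by
    rw [← Nat.one_shiftLeft]; rfl
  cases d with
  | ofNat n =>
    have hs : (Int.ofNat n) >>> i = ((n >>> i : Nat) : Int) := rfl
    rw [hs, hpow, show (Int.ofNat n) = ((n : Nat) : Int) from rfl,
        show (1 : Int) = ((1 : Nat) : Int) from rfl,
        PySem.Int.band_natCast, PySem.Int.band_natCast]
    simp only [ne_eq, Int.natCast_eq_zero]
    exact not_congr (nat_bit_iff n i)
  | negSucc n =>
    have hs : (Int.negSucc n) >>> i = Int.negSucc (n >>> i) := rfl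
    rw [hs, hpow, show (1 : Int) = ((1 : Nat) : Int) from rfl,
        band_negSucc_natCast, band_negSucc_natCast]
    simp only [ne_eq, Int.natCast_eq_zero]
    have hb := nat_bit_iff n i
    have hco : 1 &&& (n >>> i) = (n >>> i) &&& 1 := Nat.and_comm 1 (n >>> i)
    have h2co : 2 ^ i &&& n = n &&& 2 ^ i := Nat.and_comm (2 ^ i) n
    have hle1 : (n >>> i) &&& 1 ≤ 1 := Nat.and_le_right
    have hle2 : n &&& 2 ^ i ≤ 2 ^ i := Nat.and_le_right
    have hp : 0 < 2 ^ i := Nat.two_pow_pos i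
    have hy : n &&& 2 ^ i = 0 ∨ n &&& 2 ^ i = 2 ^ i := by
      rw [Nat.and_two_pow]; cases n.testBit i <;> simp
    rw [hco, h2co]
    omega

lemma lead_spec (zeromark zerospace : Int) (nbits : Int) (timings : List Int) :
    sendDataLead zeromark zerospace nbits timings
      = (timings ++ (List.replicate (nbits - 64).toNat ([zeromark, zerospace] : List Int)).flatten,
         min nbits 64) := by
  induction nbits, timings using sendDataLead.induct zeromark zerospace with
  | case1 nbits timings h ih =>
    rw [sendDataLead, if_pos h, ih]
    have h1 : (nbits - 64).toNat = (nbits - 1 - 64).toNat + 1 := by omega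
    have h2 : min (nbits - 1) 64 = min nbits 64 := by omega
    rw [h1, h2, List.replicate_succ]
    simp
  | case2 nbits timings h =>
    rw [sendDataLead, if_neg h]
    have h1 : (nbits - 64).toNat = 0 := by omega
    simp [h1]
    omega

lemma mask_spec (onemark onespace zeromark zerospace data : Int) (k : Nat) (timings : List Int) :
    sendDataMask onemark onespace zeromark zerospace data ((1 : Nat) <<< k) timings
      = timings ++ ((List.range (k + 1)).reverse).flatMap
          (emitBit onemark onespace zeromark zerospace data) := by
  induction k generalizing timings with
  | zero =>
    simp [sendDataMask, emitBit, List.range_succ]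
  | succ k ih =>
    have hne : ((1 : Nat) <<< (k + 1)) ≠ 0 := by
      rw [Nat.one_shiftLeft]; exact (Nat.two_pow_pos (k + 1)).ne'
    have hhalf : ((1 : Nat) <<< (k + 1)) >>> 1 = (1 : Nat) <<< k := by
      simp [Nat.one_shiftLeft, Nat.shiftRight_eq_div_pow, Nat.pow_succ]
    have hcast : (((1 : Nat) <<< (k + 1) : Nat) : Int) = (1 : Int) <<< (k + 1) := rfl
    rw [sendDataMask, if_neg hne, hhalf, ih, hcast]
    rw [List.range_succ (n := k + 1)]
    simp [emitBit]

lemma lsb_spec (onemark onespace zeromark zerospace : Int) (d : Int) (n : Nat) (timings : List Int) :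
    sendDataLsb onemark onespace zeromark zerospace d n timings
      = timings ++ (List.range n).flatMap
          (fun (i : Nat) => if PySem.Int.band (d >>> i) 1 ≠ 0 then [onemark, onespace]
                            else [zeromark, zerospace]) := by
  induction n generalizing d timings with
  | zero => simp [sendDataLsb]
  | succ m ih =>
    rw [sendDataLsb, ih, List.range_succ_eq_map]
    have hsh : ∀ j : Nat, (d >>> (1 : Nat)) >>> j = d >>> (j + 1) := by
      intro j
      rw [Nat.add_comm j 1, Int.shiftRight_add]
    have h0 : d >>> (0 : Nat) = d := by
      cases d <;> rfl
    simp only [List.flatMap_cons, List.flatMap_map, hsh, h0]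
    simp [List.append_assoc]

lemma flatMap_congr_mem (l : List Nat) (f g : Nat → List Int)
    (h : ∀ a ∈ l, f a = g a) : l.flatMap f = l.flatMap g := by
  induction l with
  | nil => rfl
  | cons x xs ih =>
    simp only [List.flatMap_cons]
    rw [h x (List.mem_cons_self), ih (fun a ha => h a (List.mem_cons_of_mem x ha))]

lemma replicate_flatten_eq (n : Nat) (x : List Int) :
    (List.replicate n x).flatten = (List.range n).flatMap (fun _ => x) := by
  induction n with
  | zero => rfl
  | succ m ih => simp [List.replicate_succ, List.range_succ_eq_map, ih, List.flatMap_map]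

lemma range_reverse_map (n : Nat) :
    (List.range n).reverse = (List.range n).map (fun j => n - 1 - j) := by
  induction n with
  | zero => rfl
  | succ m ih =>
    conv_lhs => rw [List.range_succ]
    conv_rhs => rw [List.range_succ_eq_map]
    rw [List.reverse_append, List.map_cons, List.map_map, ih]
    have h1 : m + 1 - 1 - 0 = m := by omega
    have h2 : ((fun j => m + 1 - 1 - j) ∘ Nat.succ) = fun j => m - 1 - j := by
      funext j
      simp only [Function.comp]
      omega
    rw [h1, h2]
    simp

lemma rev_range_flatMap (n : Nat) (f : Nat → List Int) :
    (List.range n).reverse.flatMap f = (List.range n).flatMap (fun j => f (n - 1 - j)) := by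
  rw [range_reverse_map, List.flatMap_map]

-- a map over range (2*n) is a flatMap of pairs over range n
lemma range_two_mul_map (n : Nat) (g : Nat → Int) :
    (List.range (2 * n)).map g
      = (List.range n).flatMap (fun j => [g (2 * j), g (2 * j + 1)]) := by
  induction n with
  | zero => rfl
  | succ m ih =>
    have h2 : 2 * (m + 1) = (2 * m + 1) + 1 := by omega
    rw [h2, List.range_succ, List.range_succ, List.range_succ (n := m)]
    simp [ih]

-- ===== VERDICT (by name: the statement is the Claim_ definitions above) =====
theorem sendData_spec : Claim_equal_sendData := by
  unfold Claim_equal_sendData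
  intro onemark onespace zeromark zerospace data nbits MSBfirst hdom hpre
  unfold Spec_sendData
  unfold Pre_sendData at hpre
  by_cases hle : nbits ≤ 0
  · -- A: nbits = 0 returns [], or LSB with empty range; B returns []
    rw [sendData_alt, if_pos hle, sendData]
    by_cases h0 : nbits = 0
    · simp [h0]
    · rw [if_neg h0]
      cases MSBfirst with
      | true => exact absurd (hpre rfl) (by omega)
      | false =>
        have : nbits.toNat = 0 := by omega
        simp [this, sendDataLsb]
  · -- nbits ≥ 1
    have h0 : nbits ≠ 0 := by omega
    rw [sendData, if_neg h0, sendData_alt, if_neg hle]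
    have hN : (2 * nbits - 0).toNat = 2 * nbits.toNat := by omega
    rw [PySem.List.pyRange_one, hN, List.map_map, range_two_mul_map]
    cases MSBfirst with
    | true =>
      simp only [if_true, lead_spec, List.nil_append]
      set leadN : Nat := (nbits - 64).toNat with hlead
      set capN : Nat := (min nbits 64).toNat with hcap
      have hM : ((min nbits 64) - 1).toNat + 1 = capN := by omega
      have hNtot : nbits.toNat = leadN + capN := by omega
      rw [mask_spec, hM, replicate_flatten_eq, rev_range_flatMap, hNtot]
      rw [List.range_add, List.flatMap_append, List.flatMap_map]
      congr 1
      · -- leading zeros part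
        apply flatMap_congr_mem
        intro j hj
        have hjlt : j < leadN := List.mem_range.mp hj
        have hk : ((0 : Int) + ((2 * j : Nat) : Int)) = 2 * (j : Int) := by push_cast; ring
        have hk1 : ((0 : Int) + ((2 * j + 1 : Nat) : Int)) = 2 * (j : Int) + 1 := by push_cast; ring
        simp only [Function.comp, hk, hk1]
        have hm0 : PySem.Int.mod (2 * (j : Int)) 2 = 0 := by
          rw [PySem.Int.mod_eq_emod_of_pos (show (0:Int) < 2 by omega)]; omega
        have hm1 : PySem.Int.mod (2 * (j : Int) + 1) 2 = 1 := by
          rw [PySem.Int.mod_eq_emod_of_pos (show (0:Int) < 2 by omega)]; omega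
        have hd0 : PySem.Int.floordiv (2 * (j : Int)) 2 = (j : Int) := by
          rw [PySem.Int.floordiv_eq_ediv_of_pos (show (0:Int) < 2 by omega)]; omega
        have hd1 : PySem.Int.floordiv (2 * (j : Int) + 1) 2 = (j : Int) := by
          rw [PySem.Int.floordiv_eq_ediv_of_pos (show (0:Int) < 2 by omega)]; omega
        rw [hm0, hd0, hm1, hd1]
        have hnotge : ¬ ((j : Int) ≥ nbits - min nbits 64) := by
          have : (leadN : Int) = nbits - min nbits 64 := by omega
          omega
        simp [hnotge]
      · -- data bits part
        apply flatMap_congr_mem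
        intro t ht
        have htlt : t < capN := List.mem_range.mp ht
        have hk : ((0 : Int) + ((2 * (leadN + t) : Nat) : Int)) = 2 * ((leadN + t : Nat) : Int) := by
          push_cast; ring
        have hk1 : ((0 : Int) + ((2 * (leadN + t) + 1 : Nat) : Int)) = 2 * ((leadN + t : Nat) : Int) + 1 := by
          push_cast; ring
        simp only [Function.comp, hk, hk1]
        set J : Int := ((leadN + t : Nat) : Int) with hJ
        have hm0 : PySem.Int.mod (2 * J) 2 = 0 := by
          rw [PySem.Int.mod_eq_emod_of_pos (show (0:Int) < 2 by omega)]; omega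
        have hm1 : PySem.Int.mod (2 * J + 1) 2 = 1 := by
          rw [PySem.Int.mod_eq_emod_of_pos (show (0:Int) < 2 by omega)]; omega
        have hd0 : PySem.Int.floordiv (2 * J) 2 = J := by
          rw [PySem.Int.floordiv_eq_ediv_of_pos (show (0:Int) < 2 by omega)]; omega
        have hd1 : PySem.Int.floordiv (2 * J + 1) 2 = J := by
          rw [PySem.Int.floordiv_eq_ediv_of_pos (show (0:Int) < 2 by omega)]; omega
        rw [hm0, hd0, hm1, hd1]
        have hge : J ≥ nbits - min nbits 64 := by
          have : (leadN : Int) = nbits - min nbits 64 := by omega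
          omega
        have he : (min nbits 64 - 1 - (J - (nbits - min nbits 64))).toNat = capN - 1 - t := by
          have h1 : (capN : Int) = min nbits 64 := by omega
          omega
        rw [if_pos hge, he]
        have hiff := band_shift_one data (capN - 1 - t)
        unfold emitBit
        by_cases hb : PySem.Int.band data ((1 : Int) <<< (capN - 1 - t)) ≠ 0
        · have hb' : PySem.Int.band (data >>> (capN - 1 - t)) 1 ≠ 0 := hiff.mpr hb
          simp [hb, hb']
        · have hb' : ¬ PySem.Int.band (data >>> (capN - 1 - t)) 1 ≠ 0 := fun hc => hb (hiff.mp hc)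
          simp [hb, hb']
    | false =>
      simp only [Bool.false_eq_true, if_false, lsb_spec, List.nil_append]
      apply flatMap_congr_mem
      intro j hj
      have hk : ((0 : Int) + ((2 * j : Nat) : Int)) = 2 * (j : Int) := by push_cast; ring
      have hk1 : ((0 : Int) + ((2 * j + 1 : Nat) : Int)) = 2 * (j : Int) + 1 := by push_cast; ring
      simp only [Function.comp, hk, hk1]
      have hm0 : PySem.Int.mod (2 * (j : Int)) 2 = 0 := by
        rw [PySem.Int.mod_eq_emod_of_pos (show (0:Int) < 2 by omega)]; omega
      have hm1 : PySem.Int.mod (2 * (j : Int) + 1) 2 = 1 := by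
        rw [PySem.Int.mod_eq_emod_of_pos (show (0:Int) < 2 by omega)]; omega
      have hd0 : PySem.Int.floordiv (2 * (j : Int)) 2 = (j : Int) := by
        rw [PySem.Int.floordiv_eq_ediv_of_pos (show (0:Int) < 2 by omega)]; omega
      have hd1 : PySem.Int.floordiv (2 * (j : Int) + 1) 2 = (j : Int) := by
        rw [PySem.Int.floordiv_eq_ediv_of_pos (show (0:Int) < 2 by omega)]; omega
      rw [hm0, hd0, hm1, hd1]
      have hjt : ((j : Int)).toNat = j := by omega
      rw [hjt]
      by_cases hb : PySem.Int.band (data >>> j) 1 ≠ 0 <;> simp [hb]
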